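-- pv_equiv track=rewrite | github.com/Maheeya/Hangman | Players.py | displayEmptyWord
-- ===== SOURCE A (Python) =====
-- def displayEmptyWord(p1):
--     word = p1
--     emptyWord = ''
--     pos = 0
--     while pos < len(word):
--         emptyWord = emptyWord + '_'
--         pos = pos + 1
--     return emptyWord
-- ===== SOURCE B (Python) =====
-- def displayEmptyWord(p1):
--     return '_' * len(p1)
-- ===== Notes on version B (the rewrite author's own statement) =====
-- stated objective: faster
-- what changed: Replaced the while-loop that appends one underscore per position with a single closed-form string repetition of the underscore character len(p1) times.
import Mathlib
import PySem

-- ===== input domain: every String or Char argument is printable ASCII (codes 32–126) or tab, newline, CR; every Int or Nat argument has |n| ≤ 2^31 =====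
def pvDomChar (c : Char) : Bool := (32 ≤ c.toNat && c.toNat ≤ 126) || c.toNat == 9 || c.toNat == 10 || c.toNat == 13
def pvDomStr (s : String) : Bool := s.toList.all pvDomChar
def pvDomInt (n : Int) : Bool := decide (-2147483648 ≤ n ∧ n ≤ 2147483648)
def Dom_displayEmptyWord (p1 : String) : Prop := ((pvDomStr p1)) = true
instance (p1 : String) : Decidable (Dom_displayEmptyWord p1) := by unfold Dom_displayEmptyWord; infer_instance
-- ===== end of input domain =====

-- B replaces A's while-loop underscore accumulation with the closed form '_' * len(p1).
-- ===== PORT A =====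
-- while pos < len(word): emptyWord += '_'; pos += 1  — recursion on the remaining count,
-- accumulator appended on the right exactly as the Python does
def dewLoop : Nat → List Char → List Char
  | 0, acc => acc
  | n + 1, acc => dewLoop n (acc ++ ['_'])

def displayEmptyWord (p1 : String) : String :=
  String.mk (dewLoop p1.toList.length [])

-- ===== PORT B =====
-- '_' * len(p1)
def displayEmptyWord_alt (p1 : String) : String :=
  String.mk (List.replicate p1.toList.length '_')

-- ===== PRECONDITION & SPEC =====
def Spec_displayEmptyWord (p1 : String) (out : String) : Prop := out = displayEmptyWord_alt p1
instance (p1 : String) (out : String) : Decidable (Spec_displayEmptyWord p1 out) := by unfold Spec_displayEmptyWord; infer_instance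

-- ===== CLAIM (what is proved, stated in full; the proofs are below) =====
def Claim_equal_displayEmptyWord : Prop := ∀ (p1 : String), Dom_displayEmptyWord p1 → Spec_displayEmptyWord p1 (displayEmptyWord p1)

-- ===== LEMMAS AND PROOFS =====
lemma dewLoop_eq (n : Nat) : ∀ acc : List Char, dewLoop n acc = acc ++ List.replicate n '_' := by
  induction n with
  | zero => intro acc; simp [dewLoop]
  | succ n ih =>
      intro acc
      simp [dewLoop, ih, List.replicate_succ]

-- ===== VERDICT (by name: the statement is the Claim_ definition above) =====
theorem displayEmptyWord_spec : Claim_equal_displayEmptyWord := by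
  intro p1 _
  unfold Spec_displayEmptyWord displayEmptyWord displayEmptyWord_alt
  rw [dewLoop_eq]
  simp
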